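-- pv_equiv track=rewrite | github.com/othmancs/alomrnsa | custody_request/models/money_to_text_ar.py | _convert_nn
-- ===== SOURCE A (Python) =====
-- to_19 = (
-- u'صفر', u'واحد', u'اثنان', u'ثلاثة', u'أربعة', u'خمسة', u'ستة', u'سبعة', u'ثمانية', u'تسعة', u'عشرة', u'أحد عشر', u'اثنا عشر',
-- u'ثلاثة عشر' ,
-- u'أربعة عشر', u'خمسة عشر', u'ستة عشر', u'سبعة عشر', u'ثمانية عشر', u'تسعة عشر')
--
-- tens = (u'عشرون', u'ثلاثون', u'أربعون', u'خمسون', u'ستون', u'سبعون', u'ثمانون', u'تسعون')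
--
-- def _convert_nn(val):
--     """convert a value < 100 to English.
--     """
--     if val < 20:
--         return to_19[val]
--     for (dcap, dval) in ((k, 20 + (10 * v)) for (v, k) in enumerate(tens)):
--         if dval + 10 > val:
--             if val % 10:
--                 return to_19[val % 10]+ u' و ' +dcap
--             return dcap
-- ===== SOURCE B (Python) =====
-- to_19 = (
-- u'صفر', u'واحد', u'اثنان', u'ثلاثة', u'أربعة', u'خمسة', u'ستة', u'سبعة', u'ثمانية', u'تسعة', u'عشرة', u'أحد عشر', u'اثنا عشر',
-- u'ثلاثة عشر' ,
-- u'أربعة عشر', u'خمسة عشر', u'ستة عشر', u'سبعة عشر', u'ثمانية عشر', u'تسعة عشر')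
--
-- tens = (u'عشرون', u'ثلاثون', u'أربعون', u'خمسون', u'ستون', u'سبعون', u'ثمانون', u'تسعون')
--
-- def _convert_nn(val):
--     """convert a value < 100 to Arabic words (closed-form tens index, no scan)."""
--     if val < 20:
--         return to_19[val]
--     if val < 100:
--         dcap = tens[val // 10 - 2]
--         unit = val % 10
--         if unit:
--             return to_19[unit] + u' و ' + dcap
--         return dcap
-- ===== Notes on version B (the rewrite author's own statement) =====
-- stated objective: simpler
-- what changed: Replaces the enumerate-based linear scan over the tens tuple with a closed-form index computation (tens[val // 10 - 2], unit = val % 10), keeping the <20 table lookup.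
-- outside the precondition, e.g. on _convert_nn(100): A returns None, B returns None; on _convert_nn(-21): A raises IndexError, B raises IndexError
import Mathlib
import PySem

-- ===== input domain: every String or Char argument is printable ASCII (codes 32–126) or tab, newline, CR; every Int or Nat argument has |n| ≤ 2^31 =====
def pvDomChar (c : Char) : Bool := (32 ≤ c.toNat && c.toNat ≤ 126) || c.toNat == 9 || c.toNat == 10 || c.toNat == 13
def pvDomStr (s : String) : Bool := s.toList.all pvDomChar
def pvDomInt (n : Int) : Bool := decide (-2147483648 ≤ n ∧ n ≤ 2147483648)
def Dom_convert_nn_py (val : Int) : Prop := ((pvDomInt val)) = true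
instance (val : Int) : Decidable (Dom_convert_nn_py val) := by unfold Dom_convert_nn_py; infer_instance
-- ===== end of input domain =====

-- B replaces A's linear scan over the tens table with a closed-form index (val // 10 - 2, val % 10): simpler, same values.

-- ===== PORT A =====
def pvTo19 : List String :=
  ["صفر", "واحد", "اثنان", "ثلاثة", "أربعة", "خمسة", "ستة", "سبعة", "ثمانية", "تسعة", "عشرة",
   "أحد عشر", "اثنا عشر", "ثلاثة عشر", "أربعة عشر", "خمسة عشر", "ستة عشر", "سبعة عشر",
   "ثمانية عشر", "تسعة عشر"]

def pvTens : List String :=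
  ["عشرون", "ثلاثون", "أربعون", "خمسون", "ستون", "سبعون", "ثمانون", "تسعون"]

-- the for-loop over ((k, 20 + 10*v) for (v, k) in enumerate(tens)); "" stands for the fall-through None (excluded by Pre_)
def pvLoopA (val : Int) : List (Int × String) → String
  | [] => ""
  | (v, dcap) :: rest =>
      let dval : Int := 20 + 10 * v
      if dval + 10 > val then
        if PySem.Int.mod val 10 ≠ 0 then
          (PySem.List.pyGet? pvTo19 (PySem.Int.mod val 10)).getD "" ++ " و " ++ dcap
        else dcap
      else pvLoopA val rest

def convert_nn_py (val : Int) : String :=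
  if val < 20 then (PySem.List.pyGet? pvTo19 val).getD ""
  else pvLoopA val (PySem.List.enumerate pvTens)

-- ===== PORT B =====
def convert_nn_py_alt (val : Int) : String :=
  if val < 20 then (PySem.List.pyGet? pvTo19 val).getD ""
  else if val < 100 then
    let dcap := (PySem.List.pyGet? pvTens (PySem.Int.floordiv val 10 - 2)).getD ""
    let unit := PySem.Int.mod val 10
    if unit ≠ 0 then (PySem.List.pyGet? pvTo19 unit).getD "" ++ " و " ++ dcap
    else dcap
  else ""  -- fall-through None, excluded by Pre_

-- ===== PRECONDITION & SPEC =====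
-- Pre_ excludes val < -20, where A raises IndexError, and val >= 100, where A falls
-- through and returns None (not a string); B behaves the same on both.
def Pre_convert_nn_py (val : Int) : Prop := -20 ≤ val ∧ val < 100
instance (val : Int) : Decidable (Pre_convert_nn_py val) := by unfold Pre_convert_nn_py; infer_instance
def pvWitness_convert_nn_py : Int := (37)

def Spec_convert_nn_py (val : Int) (out : String) : Prop := out = convert_nn_py_alt val
instance (val : Int) (out : String) : Decidable (Spec_convert_nn_py val out) := by unfold Spec_convert_nn_py; infer_instance

-- ===== CLAIM (what is proved, stated in full; the proofs are below) =====
def Claim_equal_convert_nn_py : Prop := ∀ (val : Int), Dom_convert_nn_py val → Pre_convert_nn_py val → Spec_convert_nn_py val (convert_nn_py val)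

-- ===== LEMMAS AND PROOFS =====
set_option maxRecDepth 10000 in
theorem pv_equal_on_range : ∀ v ∈ PySem.List.pyRange (-20) 100 1, convert_nn_py v = convert_nn_py_alt v := by decide

-- ===== VERDICT (by name: the statement is the Claim_ definition above) =====
theorem convert_nn_py_spec : Claim_equal_convert_nn_py := by
  intro val _ hp
  unfold Spec_convert_nn_py
  obtain ⟨h1, h2⟩ := hp
  apply pv_equal_on_range
  rw [PySem.List.mem_pyRange_one]; omega
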